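-- pv_equiv track=rewrite | github.com/subashreevs/applied-algorithms | Assignments/Assignment4/Question7.py | collect_items
-- ===== SOURCE A (Python) =====
-- from collections import deque  # Import deque for efficient queue operations in BFS
--
-- def collect_items(matrix_grid: list[list[int]]) -> int:
--     # Get the dimensions of the matrix grid
--     total_rows, total_columns = len(matrix_grid), len(matrix_grid[0])
--
--     # Collect all items in the grid that are greater than 1, along with their positions, and sort them
--     items_to_collect = sorted([(matrix_grid[row][col], row, col)
--                                for row in range(total_rows)
--                                for col in range(total_columns)
--                                if matrix_grid[row][col] > 1])
--     # Add the starting position at (1, 0, 0) where 1 represents the starting item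
--     items_to_collect.insert(0, (1, 0, 0))
--
--     # Helper function to perform BFS and find shortest path between two points
--     def bfs_shortest_path(start_row, start_column, target_row, target_column):
--         # Track visited positions within the grid
--         visited_positions = [[False] * total_columns for _ in range(total_rows)]
--         # Initialize queue with starting position and zero steps taken
--         bfs_queue = deque([(start_row, start_column, 0)])
--         visited_positions[start_row][start_column] = True  # Mark start as visited
--
--         # Process each position in the queue
--         while bfs_queue:
--             current_row, current_column, steps_taken = bfs_queue.popleft()
--             # If the target position is reached, return the number of steps taken
--             if current_row == target_row and current_column == target_column:
--                 return steps_taken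
--
--             # Check all four directions for possible moves
--             for row_offset, col_offset in [(-1, 0), (1, 0), (0, -1), (0, 1)]:
--                 new_row, new_column = current_row + row_offset, current_column + col_offset
--                 # Ensure the new position is within bounds, not visited, and not blocked
--                 if 0 <= new_row < total_rows and 0 <= new_column < total_columns and \
--                    not visited_positions[new_row][new_column] and matrix_grid[new_row][new_column] != 0:
--                     visited_positions[new_row][new_column] = True  # Mark new position as visited
--                     bfs_queue.append((new_row, new_column, steps_taken + 1))  # Add new position to queue with incremented steps
--
--         return -1  # Return -1 if target is unreachable
--
--     # Initialize total steps to collect all items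
--     total_steps_to_collect_items = 0
--
--     # Iterate over all items to collect, calculating shortest path between consecutive items
--     for item_index in range(1, len(items_to_collect)):
--         _, start_row, start_column = items_to_collect[item_index - 1]
--         _, target_row, target_column = items_to_collect[item_index]
--
--         # Use BFS to calculate steps required to reach the next item
--         steps_to_next_item = bfs_shortest_path(start_row, start_column, target_row, target_column)
--         if steps_to_next_item == -1:
--             return -1  # Return -1 if an item is unreachable
--
--         # Accumulate the steps taken
--         total_steps_to_collect_items += steps_to_next_item
--
--     # Return the total steps required to collect all items in sorted order
--     return total_steps_to_collect_items
-- ===== SOURCE B (Python) =====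
-- def collect_items(matrix_grid: list[list[int]]) -> int:
--     rows, cols = len(matrix_grid), len(matrix_grid[0])
--
--     # cells holding an item (> 1), ordered by (value, row, col)
--     targets = sorted((matrix_grid[r][c], r, c)
--                      for r in range(rows)
--                      for c in range(cols)
--                      if matrix_grid[r][c] > 1)
--
--     # Shortest leg by fixed-point iteration of a whole-grid reachability
--     # relaxation (no queue, no frontier): reached[r][c] becomes True when the
--     # cell is reachable from the start within `steps` moves; one relaxation
--     # round recomputes the entire boolean grid from the previous one. The
--     # first round at which the target is reached is the shortest distance;
--     # if the grid stabilises without reaching it, the target is unreachable.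
--     def shortest_leg(sr, sc, tr, tc):
--         reached = [[False] * cols for _ in range(rows)]
--         reached[sr][sc] = True
--         steps = 0
--         while True:
--             if reached[tr][tc]:
--                 return steps
--             new = [[reached[r][c] or
--                     (matrix_grid[r][c] != 0 and
--                      ((r > 0 and reached[r - 1][c]) or
--                       (r + 1 < rows and reached[r + 1][c]) or
--                       (c > 0 and reached[r][c - 1]) or
--                       (c + 1 < cols and reached[r][c + 1])))
--                     for c in range(cols)]
--                    for r in range(rows)]
--             if new == reached:
--                 return -1
--             reached = new
--             steps += 1
--
--     # thread the previous position through the target list instead of indexing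
--     total = 0
--     pr, pc = 0, 0
--     for _, r, c in targets:
--         d = shortest_leg(pr, pc, r, c)
--         if d == -1:
--             return -1
--         total += d
--         pr, pc = r, c
--     return total
-- ===== Notes on version B (the rewrite author's own statement) =====
-- stated objective: alternative
-- what changed: The inner graph search is a different algorithm: instead of A's deque-based BFS that pops cells and enqueues unvisited neighbours, B computes each leg by fixed-point iteration of a whole-grid boolean reachability relaxation (each round rebuilds the entire reached-matrix from the previous one, with no queue, no visited bookkeeping and no per-node distances), returning the first round at which the target becomes reached or -1 when the grid stabilises; the outer pass threads the previous position through the sorted item list instead of indexing items_to_collect[i-1]/[i] after insert(0,...).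
import Mathlib
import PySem

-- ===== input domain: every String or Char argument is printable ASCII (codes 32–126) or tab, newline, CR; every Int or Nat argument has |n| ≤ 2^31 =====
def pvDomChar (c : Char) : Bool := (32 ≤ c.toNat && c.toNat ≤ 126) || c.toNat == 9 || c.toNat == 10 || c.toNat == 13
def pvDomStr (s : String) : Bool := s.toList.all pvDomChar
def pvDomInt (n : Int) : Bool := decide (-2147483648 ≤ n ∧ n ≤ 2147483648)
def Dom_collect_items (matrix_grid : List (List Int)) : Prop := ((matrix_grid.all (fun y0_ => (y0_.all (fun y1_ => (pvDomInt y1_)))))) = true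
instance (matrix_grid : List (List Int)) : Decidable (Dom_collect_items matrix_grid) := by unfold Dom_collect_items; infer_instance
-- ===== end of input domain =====

-- B replaces A's deque-based BFS by a different algorithm: each leg's distance is computed by
-- fixed-point iteration of a whole-grid boolean reachability relaxation (every round rebuilds the
-- entire reached-matrix from the previous one; no queue, no visited bookkeeping, no per-node
-- distances), returning the first round at which the target is reached, or -1 when the grid
-- stabilises first; the outer pass threads the previous position through the sorted item list
-- instead of indexing it (objective: alternative, not faster).

-- ===== PORT A =====
-- shared primitive accessors (both Pythons contain the identical expressions)
-- matrix_grid[r][c]; every use is guarded/in range under Pre_, so pyGetD is exact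
def pvGrid (g : List (List Int)) (r c : Int) : Int :=
  PySem.List.pyGetD (PySem.List.pyGetD g r []) c 0

-- visited[r][c] / reached[r][c] (reads/writes are in range at every use)
def pvVisGet (v : List (List Bool)) (r c : Int) : Bool :=
  PySem.List.pyGetD (PySem.List.pyGetD v r []) c false

def pvVisSet (v : List (List Bool)) (r c : Int) : List (List Bool) :=
  PySem.List.pySetD v r (PySem.List.pySetD (PySem.List.pyGetD v r []) c true)

-- [[False]*cols for _ in range(rows)]  (cols ≥ 0 at every use, so replicate cols.toNat is exact)
def pvVisInit (rows cols : Int) : List (List Bool) :=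
  (PySem.List.pyRange 0 rows).map (fun _ => List.replicate cols.toNat false)

-- sorted([(matrix_grid[r][c], r, c) ...]): Python sorts the triples lexicographically; the
-- comprehension lists ties of (value, row) with strictly increasing col, so the STABLE sorted2
-- on the first two components is exactly Python's triple sort.
def pvItems (g : List (List Int)) (rows cols : Int) : List (Int × Int × Int) :=
  PySem.List.sorted2
    ((PySem.List.pyRange 0 rows).flatMap (fun r =>
      ((PySem.List.pyRange 0 cols).filter (fun c => pvGrid g r c > 1)).map
        (fun c => (pvGrid g r c, r, c))))
    (fun t => t.1) (fun t => t.2.1)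

-- number of False entries of the visited matrix; pvCountFalse v0 + 1 is a sufficient fuel for
-- both loops (each BFS pop / each relaxation round strictly decreases it plus the queue length,
-- proved below), so the fuel-0 branches below are never reached from pvLegA / pvLegC
def pvCountFalse (v : List (List Bool)) : Nat :=
  (v.map (fun row => row.count false)).sum

-- one candidate move of A's BFS: bounds, unvisited and open checks, then mark + enqueue
def pvTryA (g : List (List Int)) (rows cols s : Int)
    (st : List (List Bool) × List (Int × Int × Int)) (nr nc : Int) :
    List (List Bool) × List (Int × Int × Int) :=
  if 0 ≤ nr ∧ nr < rows ∧ 0 ≤ nc ∧ nc < cols ∧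
      pvVisGet st.1 nr nc = false ∧ pvGrid g nr nc ≠ 0 then
    (pvVisSet st.1 nr nc, st.2 ++ [(nr, nc, s)])
  else st

-- the four neighbour checks of one popped cell, in Python's direction order
def pvStepA (g : List (List Int)) (rows cols s : Int)
    (v : List (List Bool)) (q : List (Int × Int × Int)) (r c : Int) :
    List (List Bool) × List (Int × Int × Int) :=
  pvTryA g rows cols s
    (pvTryA g rows cols s
      (pvTryA g rows cols s
        (pvTryA g rows cols s (v, q) (r - 1) c)
        (r + 1) c)
      r (c - 1))
    r (c + 1)

-- A's BFS loop: pop the head, return steps at the target, else enqueue the four neighbours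
def pvBfsA (g : List (List Int)) (rows cols tr tc : Int) :
    Nat → List (List Bool) → List (Int × Int × Int) → Int
  | 0, _, _ => -1          -- fuel exhausted; unreachable from pvLegA's fuel
  | _ + 1, _, [] => -1
  | fuel + 1, v, (r, c, s) :: rest =>
    if r = tr ∧ c = tc then s
    else
      match pvStepA g rows cols (s + 1) v rest r c with
      | (v', q') => pvBfsA g rows cols tr tc fuel v' q'

-- visited = [[False]*cols ...]; visited[sr][sc] = True; queue = deque([(sr, sc, 0)])
def pvLegA (g : List (List Int)) (rows cols sr sc tr tc : Int) : Int :=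
  pvBfsA g rows cols tr tc
    (pvCountFalse (pvVisSet (pvVisInit rows cols) sr sc) + 1)
    (pvVisSet (pvVisInit rows cols) sr sc) [(sr, sc, 0)]

-- for item_index in range(1, len(items)): ... (indices i-1, i are always in range, pyGetD exact)
def pvOuterA (g : List (List Int)) (rows cols : Int) (items : List (Int × Int × Int)) :
    List Int → Int → Int
  | [], total => total
  | i :: rest, total =>
    let p := PySem.List.pyGetD items (i - 1) (0, 0, 0)
    let t := PySem.List.pyGetD items i (0, 0, 0)
    let d := pvLegA g rows cols p.2.1 p.2.2 t.2.1 t.2.2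
    if d = -1 then -1 else pvOuterA g rows cols items rest (total + d)

def collect_items (matrix_grid : List (List Int)) : Int :=
  let rows : Int := matrix_grid.length
  let cols : Int := (PySem.List.pyGetD matrix_grid 0 []).length  -- len(matrix_grid[0]); Pre_ gives matrix_grid ≠ []
  let items := PySem.List.insert (pvItems matrix_grid rows cols) 0 (1, 0, 0)
  pvOuterA matrix_grid rows cols items (PySem.List.pyRange 1 items.length) 0

-- ===== PORT B =====
-- one whole-grid relaxation round: new[r][c] = reached[r][c] or (open and some reached neighbour)
-- (the guarded neighbour reads are in range whenever evaluated, so pyGetD via pvVisGet is exact)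
def pvClosureStep (g : List (List Int)) (rows cols : Int) (v : List (List Bool)) :
    List (List Bool) :=
  (PySem.List.pyRange 0 rows).map (fun r =>
    (PySem.List.pyRange 0 cols).map (fun c =>
      pvVisGet v r c ||
        (decide (pvGrid g r c ≠ 0) &&
          ((decide (0 < r) && pvVisGet v (r - 1) c) ||
           (decide (r + 1 < rows) && pvVisGet v (r + 1) c) ||
           (decide (0 < c) && pvVisGet v r (c - 1)) ||
           (decide (c + 1 < cols) && pvVisGet v r (c + 1))))))

-- while True: if reached[tr][tc]: return steps; new = step; if new == reached: return -1; ...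
def pvClosureLoop (g : List (List Int)) (rows cols tr tc : Int) :
    Nat → List (List Bool) → Int → Int
  | 0, _, _ => -1          -- fuel exhausted; unreachable from pvLegC's fuel
  | fuel + 1, v, steps =>
    if pvVisGet v tr tc = true then steps
    else
      let v' := pvClosureStep g rows cols v
      if v' = v then -1
      else pvClosureLoop g rows cols tr tc fuel v' (steps + 1)

-- reached = [[False]*cols ...]; reached[sr][sc] = True; steps = 0
def pvLegC (g : List (List Int)) (rows cols sr sc tr tc : Int) : Int :=
  pvClosureLoop g rows cols tr tc
    (pvCountFalse (pvVisSet (pvVisInit rows cols) sr sc) + 1)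
    (pvVisSet (pvVisInit rows cols) sr sc) 0

-- for _, r, c in targets: ... threading the previous position
def pvOuterC (g : List (List Int)) (rows cols : Int) :
    List (Int × Int × Int) → Int → Int → Int → Int
  | [], _, _, total => total
  | (_, r, c) :: rest, pr, pc, total =>
    let d := pvLegC g rows cols pr pc r c
    if d = -1 then -1 else pvOuterC g rows cols rest r c (total + d)

def collect_items_alt (matrix_grid : List (List Int)) : Int :=
  let rows : Int := matrix_grid.length
  let cols : Int := (PySem.List.pyGetD matrix_grid 0 []).length
  pvOuterC matrix_grid rows cols (pvItems matrix_grid rows cols) 0 0 0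

-- ===== PRECONDITION & SPEC =====
-- Pre_ excludes exactly the inputs on which Python A raises IndexError: the empty grid
-- (matrix_grid[0]) and ragged grids with a row shorter than the first row.
def Pre_collect_items (matrix_grid : List (List Int)) : Prop :=
  matrix_grid ≠ [] ∧ ∀ row ∈ matrix_grid, matrix_grid.headI.length ≤ row.length

instance (matrix_grid : List (List Int)) : Decidable (Pre_collect_items matrix_grid) := by
  unfold Pre_collect_items; infer_instance

def pvWitness_collect_items : List (List Int) := [[1, 2], [1, 3]]

def Spec_collect_items (matrix_grid : List (List Int)) (out : Int) : Prop :=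
  out = collect_items_alt matrix_grid

instance (matrix_grid : List (List Int)) (out : Int) : Decidable (Spec_collect_items matrix_grid out) := by
  unfold Spec_collect_items; infer_instance

-- ===== CLAIM (what is proved, stated in full; the proofs are below) =====
def Claim_equal_collect_items : Prop := ∀ (matrix_grid : List (List Int)), Dom_collect_items matrix_grid → Pre_collect_items matrix_grid → Spec_collect_items matrix_grid (collect_items matrix_grid)

-- ===== LEMMAS AND PROOFS =====
-- The proof goes through an intermediate level-synchronous BFS (pvLevelB below, proof-only):
-- A's deque BFS is shown equal to it (pvLegSim), and it is shown equal to B's fixed-point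
-- relaxation via an invariant (visited set closed under expansion away from the frontier).

-- proof-side level-synchronous BFS ---------------------------------------------------------
def pvTryB (g : List (List Int)) (rows cols : Int)
    (st : List (List Bool) × List (Int × Int)) (nr nc : Int) :
    List (List Bool) × List (Int × Int) :=
  if 0 ≤ nr ∧ nr < rows ∧ 0 ≤ nc ∧ nc < cols ∧
      pvVisGet st.1 nr nc = false ∧ pvGrid g nr nc ≠ 0 then
    (pvVisSet st.1 nr nc, st.2 ++ [(nr, nc)])
  else st

def pvExpandB (g : List (List Int)) (rows cols : Int)
    (st : List (List Bool) × List (Int × Int)) (p : Int × Int) :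
    List (List Bool) × List (Int × Int) :=
  pvTryB g rows cols
    (pvTryB g rows cols
      (pvTryB g rows cols
        (pvTryB g rows cols st (p.1 - 1) p.2)
        (p.1 + 1) p.2)
      p.1 (p.2 - 1))
    p.1 (p.2 + 1)

def pvLevelB (g : List (List Int)) (rows cols tr tc : Int) :
    Nat → List (List Bool) → List (Int × Int) → Int → Int
  | 0, _, _, _ => -1
  | _ + 1, _, [], _ => -1
  | fuel + 1, v, p :: fs, steps =>
    if (p :: fs).contains (tr, tc) then steps
    else
      match (p :: fs).foldl (pvExpandB g rows cols) (v, []) with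
      | (v', nxt) => pvLevelB g rows cols tr tc fuel v' nxt (steps + 1)

def pvLegB (g : List (List Int)) (rows cols sr sc tr tc : Int) : Int :=
  pvLevelB g rows cols tr tc
    (pvCountFalse (pvVisSet (pvVisInit rows cols) sr sc) + 1)
    (pvVisSet (pvVisInit rows cols) sr sc) [(sr, sc)] 0

def pvOuterB (g : List (List Int)) (rows cols : Int) :
    List (Int × Int × Int) → Int → Int → Int → Int
  | [], _, _, total => total
  | (_, r, c) :: rest, pr, pc, total =>
    let d := pvLegB g rows cols pr pc r c
    if d = -1 then -1 else pvOuterB g rows cols rest r c (total + d)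

-- shape invariant of the visited matrix, used to show the chosen fuel suffices ---------------
def pvShape (R C : Nat) (v : List (List Bool)) : Prop :=
  v.length = R ∧ ∀ row ∈ v, row.length = C

theorem pvIdx?_lt {L : Nat} {i : Int} {n : Nat} (h : PySem.List.pyIdx? L i = some n) : n < L := by
  unfold PySem.List.pyIdx? at h
  split_ifs at h <;> simp_all <;> omega
theorem pvShape_visInit (rows cols : Int) :
    pvShape rows.toNat cols.toNat (pvVisInit rows cols) := by
  unfold pvVisInit pvShape
  constructor
  · simp [PySem.List.length_pyRange_one]
  · intro row hrow
    simp only [List.mem_map] at hrow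
    obtain ⟨_, _, rfl⟩ := hrow
    simp
theorem pvShape_visSet {R C : Nat} {v : List (List Bool)} (hv : pvShape R C v) (r c : Int) :
    pvShape R C (pvVisSet v r c) := by
  obtain ⟨hlen, hrows⟩ := hv
  have hl' : (PySem.List.pySetD (PySem.List.pyGetD v r []) c true).length
      = (PySem.List.pyGetD v r []).length := PySem.List.length_pySetD _ _ _
  constructor
  · rw [pvVisSet, PySem.List.length_pySetD]; exact hlen
  · intro row hrow
    unfold pvVisSet at hrow
    set row' := PySem.List.pySetD (PySem.List.pyGetD v r []) c true with hdef
    unfold PySem.List.pySetD PySem.List.pySet? at hrow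
    cases hidx : PySem.List.pyIdx? v.length r with
    | none => rw [hidx] at hrow; simp at hrow; exact hrows _ hrow
    | some n =>
      have hn : n < v.length := pvIdx?_lt hidx
      rw [hidx] at hrow
      simp only [Option.map_some, Option.getD_some] at hrow
      rcases List.mem_or_eq_of_mem_set hrow with hmem | rfl
      · exact hrows _ hmem
      · rw [hl']
        have : PySem.List.pyGetD v r [] = v[n] := by
          unfold PySem.List.pyGetD PySem.List.pyGet?
          rw [hidx]
          simp [List.getElem?_eq_getElem hn]
        rw [this]
        exact hrows _ (List.getElem_mem hn)
theorem pvRowCount {row : List Bool} {j : Nat} (hj : j < row.length) (hf : row[j] = false) :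
    (row.set j true).count false + 1 = row.count false := by
  have h1 := List.count_set (a := true) (b := false) (l := row) (i := j) hj
  have h2 : 0 < row.count false := by
    rw [List.count_pos_iff]
    exact hf ▸ List.getElem_mem hj
  simp [hf] at h1
  omega
theorem pvSumCount_set (v : List (List Bool)) (n : Nat) (row' : List Bool)
    (h : n < v.length) (hc : row'.count false + 1 = (v[n]).count false) :
    pvCountFalse (v.set n row') + 1 = pvCountFalse v := by
  induction v generalizing n with
  | nil => simp at h
  | cons hd tl ih =>
    cases n with
    | zero =>
      simp only [List.getElem_cons_zero] at hc
      simp only [List.set_cons_zero, pvCountFalse, List.map_cons, List.sum_cons]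
      omega
    | succ m =>
      simp only [List.length_cons] at h
      have hc' : row'.count false + 1 = (tl[m]).count false := by simpa using hc
      have := ih m (by omega) hc'
      simp only [List.set_cons_succ, pvCountFalse, List.map_cons, List.sum_cons]
      unfold pvCountFalse at this
      omega
theorem pvCountFalse_visSet {rows cols : Int} {v : List (List Bool)}
    (hv : pvShape rows.toNat cols.toNat v) {r c : Int}
    (h0 : 0 ≤ r) (h1 : r < rows) (h2 : 0 ≤ c) (h3 : c < cols)
    (hf : pvVisGet v r c = false) :
    pvCountFalse (pvVisSet v r c) + 1 = pvCountFalse v := by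
  obtain ⟨hlen, hrows⟩ := hv
  have hr : r.toNat < v.length := by omega
  have hrow : PySem.List.pyGetD v r [] = v[r.toNat] := by
    rw [PySem.List.pyGetD_eq_getElem v [] h0 (by omega)]
  have hrlen : (v[r.toNat]).length = cols.toNat := hrows _ (List.getElem_mem hr)
  have hc : c.toNat < (v[r.toNat]).length := by omega
  have hvg : v[r.toNat][c.toNat] = false := by
    unfold pvVisGet at hf
    rw [hrow, PySem.List.pyGetD_eq_getElem _ _ h2 (by omega)] at hf
    exact hf
  unfold pvVisSet
  rw [PySem.List.pySetD_of_nonneg _ _ h0, hrow, PySem.List.pySetD_of_nonneg _ _ h2]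
  exact pvSumCount_set v r.toNat _ hr (pvRowCount hc hvg)

theorem pvTryB_shape (g : List (List Int)) (rows cols : Int)
    (st : List (List Bool) × List (Int × Int)) (nr nc : Int) {R C : Nat}
    (hv : pvShape R C st.1) : pvShape R C (pvTryB g rows cols st nr nc).1 := by
  unfold pvTryB
  split
  · exact pvShape_visSet hv _ _
  · exact hv
theorem pvTryB_measure (g : List (List Int)) (rows cols : Int)
    (st : List (List Bool) × List (Int × Int)) (nr nc : Int)
    (hv : pvShape rows.toNat cols.toNat st.1) :
    pvCountFalse (pvTryB g rows cols st nr nc).1 + (pvTryB g rows cols st nr nc).2.length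
      = pvCountFalse st.1 + st.2.length := by
  unfold pvTryB
  split
  case isTrue h =>
    obtain ⟨h0, h1, h2, h3, hf, -⟩ := h
    have := pvCountFalse_visSet hv h0 h1 h2 h3 hf
    simp only [List.length_append, List.length_cons, List.length_nil]
    omega
  case isFalse h => rfl
theorem pvExpandB_shape (g : List (List Int)) (rows cols : Int)
    (st : List (List Bool) × List (Int × Int)) (p : Int × Int) {R C : Nat}
    (hv : pvShape R C st.1) : pvShape R C (pvExpandB g rows cols st p).1 := by
  unfold pvExpandB
  exact pvTryB_shape _ _ _ _ _ _ (pvTryB_shape _ _ _ _ _ _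
    (pvTryB_shape _ _ _ _ _ _ (pvTryB_shape _ _ _ _ _ _ hv)))
theorem pvExpandB_measure (g : List (List Int)) (rows cols : Int)
    (st : List (List Bool) × List (Int × Int)) (p : Int × Int)
    (hv : pvShape rows.toNat cols.toNat st.1) :
    pvCountFalse (pvExpandB g rows cols st p).1 + (pvExpandB g rows cols st p).2.length
      = pvCountFalse st.1 + st.2.length := by
  unfold pvExpandB
  have h1 := pvTryB_shape g rows cols st (p.1 - 1) p.2 hv
  have m1 := pvTryB_measure g rows cols st (p.1 - 1) p.2 hv
  have h2 := pvTryB_shape g rows cols _ (p.1 + 1) p.2 h1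
  have m2 := pvTryB_measure g rows cols _ (p.1 + 1) p.2 h1
  have h3 := pvTryB_shape g rows cols _ p.1 (p.2 - 1) h2
  have m3 := pvTryB_measure g rows cols _ p.1 (p.2 - 1) h2
  have m4 := pvTryB_measure g rows cols _ p.1 (p.2 + 1) h3
  omega
theorem pvFoldB_shape (g : List (List Int)) (rows cols : Int)
    (F : List (Int × Int)) (st : List (List Bool) × List (Int × Int)) {R C : Nat}
    (hv : pvShape R C st.1) : pvShape R C (F.foldl (pvExpandB g rows cols) st).1 := by
  induction F generalizing st with
  | nil => exact hv
  | cons p F ih => exact ih _ (pvExpandB_shape g rows cols st p hv)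
theorem pvFoldB_measure (g : List (List Int)) (rows cols : Int)
    (F : List (Int × Int)) (st : List (List Bool) × List (Int × Int))
    (hv : pvShape rows.toNat cols.toNat st.1) :
    pvCountFalse (F.foldl (pvExpandB g rows cols) st).1
        + (F.foldl (pvExpandB g rows cols) st).2.length
      = pvCountFalse st.1 + st.2.length := by
  induction F generalizing st with
  | nil => rfl
  | cons p F ih =>
    have h1 := pvExpandB_shape g rows cols st p hv
    have m1 := pvExpandB_measure g rows cols st p hv
    have m2 := ih _ h1
    simp only [List.foldl_cons]
    omega

-- proof-side normal form of one candidate move: the new visited matrix and the appended cells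
abbrev pvGuard (g : List (List Int)) (rows cols : Int) (v : List (List Bool)) (nr nc : Int) : Prop :=
  0 ≤ nr ∧ nr < rows ∧ 0 ≤ nc ∧ nc < cols ∧ pvVisGet v nr nc = false ∧ pvGrid g nr nc ≠ 0

def pvVA (g : List (List Int)) (rows cols : Int) (v : List (List Bool)) (nr nc : Int) :
    List (List Bool) :=
  if pvGuard g rows cols v nr nc then pvVisSet v nr nc else v

def pvDel (g : List (List Int)) (rows cols : Int) (v : List (List Bool)) (nr nc : Int) :
    List (Int × Int) :=
  if pvGuard g rows cols v nr nc then [(nr, nc)] else []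

theorem pvTryB_da (g : List (List Int)) (rows cols : Int) (v : List (List Bool))
    (acc : List (Int × Int)) (nr nc : Int) :
    pvTryB g rows cols (v, acc) nr nc
      = (pvVA g rows cols v nr nc, acc ++ pvDel g rows cols v nr nc) := by
  unfold pvTryB pvVA pvDel pvGuard
  dsimp only
  split <;> simp

theorem pvTryA_da (g : List (List Int)) (rows cols s : Int) (v : List (List Bool))
    (acc : List (Int × Int × Int)) (nr nc : Int) :
    pvTryA g rows cols s (v, acc) nr nc
      = (pvVA g rows cols v nr nc,
         acc ++ (pvDel g rows cols v nr nc).map (fun u => (u.1, u.2, s))) := by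
  unfold pvTryA pvVA pvDel pvGuard
  dsimp only
  split <;> simp

theorem pvExpandB_acc (g : List (List Int)) (rows cols : Int) (v : List (List Bool))
    (acc : List (Int × Int)) (p : Int × Int) :
    pvExpandB g rows cols (v, acc) p
      = ((pvExpandB g rows cols (v, []) p).1, acc ++ (pvExpandB g rows cols (v, []) p).2) := by
  simp only [pvExpandB, pvTryB_da, List.append_assoc, List.nil_append]

theorem pvExpandB_split (g : List (List Int)) (rows cols : Int)
    (st : List (List Bool) × List (Int × Int)) (p : Int × Int) :
    pvExpandB g rows cols st p
      = ((pvExpandB g rows cols (st.1, []) p).1, st.2 ++ (pvExpandB g rows cols (st.1, []) p).2) := by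
  obtain ⟨v, acc⟩ := st
  exact pvExpandB_acc g rows cols v acc p

theorem pvStepA_toB (g : List (List Int)) (rows cols s : Int) (v : List (List Bool))
    (q : List (Int × Int × Int)) (r c : Int) :
    pvStepA g rows cols s v q r c
      = ((pvExpandB g rows cols (v, []) (r, c)).1,
         q ++ ((pvExpandB g rows cols (v, []) (r, c)).2).map (fun u => (u.1, u.2, s))) := by
  simp only [pvStepA, pvExpandB, pvTryA_da, pvTryB_da, List.append_assoc, List.nil_append,
    List.map_append]

theorem pvFoldB_split (g : List (List Int)) (rows cols : Int) :
    ∀ (F : List (Int × Int)) (st : List (List Bool) × List (Int × Int)),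
      F.foldl (pvExpandB g rows cols) st
        = ((F.foldl (pvExpandB g rows cols) (st.1, [])).1,
           st.2 ++ (F.foldl (pvExpandB g rows cols) (st.1, [])).2) := by
  intro F
  induction F with
  | nil => intro st; simp
  | cons p F ih =>
    intro st
    simp only [List.foldl_cons]
    rw [ih (pvExpandB g rows cols st p), ih (pvExpandB g rows cols (st.1, []) p),
      pvExpandB_split g rows cols st p]
    dsimp only
    simp [List.append_assoc]

-- unfolding equations for the loops
theorem pvBfsA_nil (g : List (List Int)) (rows cols tr tc : Int) (fuel : Nat)
    (v : List (List Bool)) : pvBfsA g rows cols tr tc fuel v [] = -1 := by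
  cases fuel <;> rfl

theorem pvBfsA_cons (g : List (List Int)) (rows cols tr tc : Int) (fuel : Nat)
    (v : List (List Bool)) (r c s : Int) (rest : List (Int × Int × Int)) :
    pvBfsA g rows cols tr tc (fuel + 1) v ((r, c, s) :: rest)
      = if r = tr ∧ c = tc then s
        else pvBfsA g rows cols tr tc fuel
          (pvStepA g rows cols (s + 1) v rest r c).1
          (pvStepA g rows cols (s + 1) v rest r c).2 := rfl

theorem pvLevelB_cons (g : List (List Int)) (rows cols tr tc : Int) (fuel : Nat)
    (v : List (List Bool)) (p : Int × Int) (fs : List (Int × Int)) (steps : Int) :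
    pvLevelB g rows cols tr tc (fuel + 1) v (p :: fs) steps
      = if (p :: fs).contains (tr, tc) then steps
        else pvLevelB g rows cols tr tc fuel
          ((p :: fs).foldl (pvExpandB g rows cols) (v, [])).1
          ((p :: fs).foldl (pvExpandB g rows cols) (v, [])).2
          (steps + 1) := rfl

theorem pvClosureLoop_succ (g : List (List Int)) (rows cols tr tc : Int) (fuel : Nat)
    (v : List (List Bool)) (steps : Int) :
    pvClosureLoop g rows cols tr tc (fuel + 1) v steps
      = if pvVisGet v tr tc = true then steps
        else if pvClosureStep g rows cols v = v then -1
        else pvClosureLoop g rows cols tr tc fuel (pvClosureStep g rows cols v) (steps + 1) := rfl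

-- A's queue always consists of the tail of the current level followed by the partially built
-- next level; processing the rest of the level is one whole-frontier expansion
theorem pvLevelSim (g : List (List Int)) (rows cols tr tc k : Int) :
    ∀ (F : List (Int × Int)) (G : List (Int × Int)) (v : List (List Bool)) (fuel : Nat),
      pvShape rows.toNat cols.toNat v →
      pvCountFalse v + F.length + G.length ≤ fuel →
      pvBfsA g rows cols tr tc fuel v
        (F.map (fun p => (p.1, p.2, k)) ++ G.map (fun p => (p.1, p.2, k + 1)))
      = if F.contains (tr, tc) then k
        else pvBfsA g rows cols tr tc (fuel - F.length)
          (F.foldl (pvExpandB g rows cols) (v, [])).1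
          ((G ++ (F.foldl (pvExpandB g rows cols) (v, [])).2).map (fun p => (p.1, p.2, k + 1))) := by
  intro F
  induction F with
  | nil =>
    intro G v fuel hv hb
    simp
  | cons p F ih =>
    intro G v fuel hv hb
    obtain ⟨fuel, rfl⟩ : ∃ f, fuel = f + 1 := ⟨fuel - 1, by simp at hb; omega⟩
    simp only [List.map_cons, List.cons_append, pvBfsA_cons]
    by_cases ht : p.1 = tr ∧ p.2 = tc
    · rw [if_pos ht]
      have hp : p = (tr, tc) := Prod.ext ht.1 ht.2
      simp [hp]
    · rw [if_neg ht]
      rw [pvStepA_toB]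
      dsimp only
      rw [List.append_assoc, ← List.map_append]
      have hv' : pvShape rows.toNat cols.toNat (pvExpandB g rows cols (v, []) p).1 :=
        pvExpandB_shape g rows cols (v, []) p hv
      have hm : pvCountFalse (pvExpandB g rows cols (v, []) p).1
          + (pvExpandB g rows cols (v, []) p).2.length = pvCountFalse v := by
        have := pvExpandB_measure g rows cols (v, []) p hv
        simpa using this
      have hb' : pvCountFalse (pvExpandB g rows cols (v, []) p).1 + F.length
          + (G ++ (pvExpandB g rows cols (v, []) p).2).length ≤ fuel := by
        simp only [List.length_append]
        simp only [List.length_cons] at hb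
        omega
      rw [ih (G ++ (pvExpandB g rows cols (v, []) p).2) (pvExpandB g rows cols (v, []) p).1
        fuel hv' hb']
      have hpne : p ≠ (tr, tc) := by
        intro he; exact ht (by rw [he]; exact ⟨rfl, rfl⟩)
      have hcont : (p :: F).contains (tr, tc) = F.contains (tr, tc) := by
        simp [Ne.symm hpne]
      rw [hcont]
      by_cases hc : F.contains (tr, tc)
      · rw [if_pos hc, if_pos hc]
      · rw [if_neg hc, if_neg hc]
        have hlen : fuel + 1 - (p :: F).length = fuel - F.length := by
          simp only [List.length_cons]; omega
        rw [hlen]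
        simp only [List.foldl_cons]
        rw [pvFoldB_split g rows cols F (pvExpandB g rows cols (v, []) p)]
        dsimp only
        simp [List.append_assoc]

-- the deque BFS and the level-synchronous BFS agree (measure: unvisited cells + frontier size)
theorem pvLegSim (g : List (List Int)) (rows cols tr tc : Int) :
    ∀ (n : Nat) (v : List (List Bool)) (F : List (Int × Int)) (k : Int) (fa fb : Nat),
      pvShape rows.toNat cols.toNat v →
      pvCountFalse v + F.length ≤ n →
      pvCountFalse v + F.length ≤ fa →
      pvCountFalse v + F.length ≤ fb →
      pvBfsA g rows cols tr tc fa v (F.map (fun p => (p.1, p.2, k)))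
        = pvLevelB g rows cols tr tc fb v F k := by
  intro n
  induction n with
  | zero =>
    intro v F k fa fb hv hn ha hb
    have hF : F = [] := by
      cases F with
      | nil => rfl
      | cons p F => simp at hn
    subst hF
    rw [List.map_nil, pvBfsA_nil]
    cases fb <;> rfl
  | succ n ih =>
    intro v F k fa fb hv hn ha hb
    cases F with
    | nil =>
      rw [List.map_nil, pvBfsA_nil]
      cases fb <;> rfl
    | cons p F =>
      have h1 := pvLevelSim g rows cols tr tc k (p :: F) [] v fa hv (by simpa using ha)
      simp only [List.map_nil, List.append_nil, List.nil_append] at h1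
      rw [h1]
      obtain ⟨fb, rfl⟩ : ∃ f, fb = f + 1 := ⟨fb - 1, by simp at hb; omega⟩
      rw [pvLevelB_cons]
      by_cases hc : (p :: F).contains (tr, tc)
      · rw [if_pos hc, if_pos hc]
      · rw [if_neg hc, if_neg hc]
        have hv' : pvShape rows.toNat cols.toNat
            ((p :: F).foldl (pvExpandB g rows cols) (v, [])).1 :=
          pvFoldB_shape g rows cols (p :: F) (v, []) hv
        have hm : pvCountFalse ((p :: F).foldl (pvExpandB g rows cols) (v, [])).1
            + ((p :: F).foldl (pvExpandB g rows cols) (v, [])).2.length = pvCountFalse v := by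
          have := pvFoldB_measure g rows cols (p :: F) (v, []) hv
          simpa using this
        apply ih _ _ (k + 1) _ _ hv'
        · simp only [List.length_cons] at hn ha hb ⊢; omega
        · simp only [List.length_cons] at hn ha hb ⊢; omega
        · simp only [List.length_cons] at hn ha hb ⊢; omega

-- the two per-leg searches of A and the level BFS coincide
theorem pvLegAB (g : List (List Int)) (rows cols sr sc tr tc : Int) :
    pvLegA g rows cols sr sc tr tc = pvLegB g rows cols sr sc tr tc := by
  unfold pvLegA pvLegB
  have hv := pvShape_visSet (pvShape_visInit rows cols) sr sc
  have h := pvLegSim g rows cols tr tc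
    (pvCountFalse (pvVisSet (pvVisInit rows cols) sr sc) + 1)
    (pvVisSet (pvVisInit rows cols) sr sc) [(sr, sc)] 0
    (pvCountFalse (pvVisSet (pvVisInit rows cols) sr sc) + 1)
    (pvCountFalse (pvVisSet (pvVisInit rows cols) sr sc) + 1)
    hv (by simp) (by simp) (by simp)
  simpa using h

-- A's index walk over the inserted list is the threading of the previous position
theorem pvOuterSim (g : List (List Int)) (rows cols : Int) :
    ∀ (L done : List (Int × Int × Int)) (prev : Int × Int × Int) (total : Int),
      pvOuterA g rows cols (done ++ prev :: L)
        (PySem.List.pyRange ((done.length : Int) + 1) ((done.length : Int) + 1 + L.length)) total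
      = pvOuterB g rows cols L prev.2.1 prev.2.2 total := by
  intro L
  induction L with
  | nil =>
    intro done prev total
    rw [PySem.List.pyRange_one_eq_nil (by simp)]
    rfl
  | cons x L ih =>
    intro done prev total
    obtain ⟨xv, xr, xc⟩ := x
    rw [PySem.List.pyRange_one_cons (by push_cast [List.length_cons]; omega)]
    simp only [pvOuterA]
    have hp : PySem.List.pyGetD (done ++ prev :: (xv, xr, xc) :: L)
        ((done.length : Int) + 1 - 1) (0, 0, 0) = prev := by
      have he : ((done.length : Int) + 1 - 1) = ((done.length : Nat) : Int) := by ring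
      rw [he, PySem.List.pyGetD_natCast]
      simp [List.getD]
    have hx : PySem.List.pyGetD (done ++ prev :: (xv, xr, xc) :: L)
        ((done.length : Int) + 1) (0, 0, 0) = (xv, xr, xc) := by
      have he : ((done.length : Int) + 1) = ((done.length + 1 : Nat) : Int) := by push_cast; ring
      rw [he, PySem.List.pyGetD_natCast]
      simp [List.getD]
    rw [hp, hx, pvLegAB]
    dsimp only
    by_cases hd : pvLegB g rows cols prev.2.1 prev.2.2 xr xc = -1
    · simp only [pvOuterB]
      rw [if_pos hd, if_pos hd]
    · simp only [pvOuterB]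
      rw [if_neg hd, if_neg hd]
      have hr := ih (done ++ [prev]) (xv, xr, xc)
        (total + pvLegB g rows cols prev.2.1 prev.2.2 xr xc)
      dsimp only at hr
      simp only [List.append_assoc, List.singleton_append] at hr
      have e1 : (((done ++ [prev]).length : Nat) : Int) + 1 = (done.length : Int) + 1 + 1 := by
        push_cast [List.length_append, List.length_cons, List.length_nil]; ring
      rw [e1] at hr
      have e2 : (done.length : Int) + 1 + 1 + ((L.length : Nat) : Int)
          = (done.length : Int) + 1 + ((((xv, xr, xc) :: L).length : Nat) : Int) := by
        push_cast [List.length_cons]; ring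
      rw [e2] at hr
      exact hr

-- ===== level BFS = fixed-point relaxation =====

abbrev pvInB (rows cols r c : Int) : Prop := 0 ≤ r ∧ r < rows ∧ 0 ≤ c ∧ c < cols

-- (r, c) is one of the four expansion candidates of p
def pvAdj (p : Int × Int) (r c : Int) : Prop :=
  (r = p.1 - 1 ∧ c = p.2) ∨ (r = p.1 + 1 ∧ c = p.2) ∨ (r = p.1 ∧ c = p.2 - 1) ∨ (r = p.1 ∧ c = p.2 + 1)

theorem pvVisGet_init (rows cols r c : Int) (h0 : 0 ≤ r) (h1 : r < rows) :
    pvVisGet (pvVisInit rows cols) r c = false := by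
  unfold pvVisGet pvVisInit
  rw [PySem.List.pyGetD_map_pyRange_of_nonneg _ rows r [] h0 h1]
  cases h : PySem.List.pyGet? (List.replicate cols.toNat false) c with
  | none => simp [PySem.List.pyGetD, h]
  | some x =>
    have := PySem.List.mem_of_pyGet?_eq_some _ h
    simp [PySem.List.pyGetD, h, List.eq_of_mem_replicate this]

theorem pvVisGet_visSet {rows cols : Int} {v : List (List Bool)}
    (hv : pvShape rows.toNat cols.toNat v) {r c r' c' : Int}
    (h : pvInB rows cols r c) (h' : pvInB rows cols r' c') :
    pvVisGet (pvVisSet v r c) r' c'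
      = if r' = r ∧ c' = c then true else pvVisGet v r' c' := by
  obtain ⟨hlen, hrows⟩ := hv
  obtain ⟨h0, h1, h2, h3⟩ := h
  obtain ⟨h0', h1', h2', h3'⟩ := h'
  have hrlt : r.toNat < v.length := by omega
  have hrowlen : (PySem.List.pyGetD v r []).length = cols.toNat := by
    rw [PySem.List.pyGetD_eq_getElem v [] h0 (by omega)]
    exact hrows _ (List.getElem_mem hrlt)
  have hclt : c.toNat < (PySem.List.pyGetD v r []).length := by omega
  have er : r = ((r.toNat : Nat) : Int) := by omega
  have ec : c = ((c.toNat : Nat) : Int) := by omega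
  have er' : r' = ((r'.toNat : Nat) : Int) := by omega
  have ec' : c' = ((c'.toNat : Nat) : Int) := by omega
  unfold pvVisGet pvVisSet
  rw [er, er', ec, ec']
  rw [PySem.List.pyGetD_pySetD_natCast v r.toNat r'.toNat _ [] hrlt]
  by_cases hre : r'.toNat = r.toNat
  · rw [if_pos hre, hre]
    rw [PySem.List.pyGetD_pySetD_natCast _ c.toNat c'.toNat true false (er ▸ hclt)]
    by_cases hce : c'.toNat = c.toNat
    · rw [if_pos hce, if_pos (by omega)]
    · rw [if_neg hce, if_neg (by omega)]
  · rw [if_neg hre, if_neg (by omega)]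

-- the start matrix: exactly the start cell is reached
theorem pvVisGet_start {rows cols sr sc : Int} (hs : pvInB rows cols sr sc)
    {r c : Int} (h : pvInB rows cols r c) :
    pvVisGet (pvVisSet (pvVisInit rows cols) sr sc) r c = decide (r = sr ∧ c = sc) := by
  rw [pvVisGet_visSet (pvShape_visInit rows cols) hs h]
  by_cases he : r = sr ∧ c = sc
  · simp [he]
  · simp only [if_neg he]
    rw [pvVisGet_init rows cols r c h.1 h.2.1]
    simp [he]

-- getter/getElem bridge and extensionality for shaped matrices
theorem pvGet_natCast (v : List (List Bool)) (i j : Nat) (hi : i < v.length)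
    (hj : j < (v[i]).length) : pvVisGet v (i : Int) (j : Int) = v[i][j] := by
  unfold pvVisGet
  rw [PySem.List.pyGetD_eq_getElem v [] (by omega) (by omega)]
  simp only [Int.toNat_natCast]
  rw [PySem.List.pyGetD_eq_getElem _ false (by omega) (by omega)]
  simp

theorem pvEqOfGet {R C : Nat} {u w : List (List Bool)}
    (hu : pvShape R C u) (hw : pvShape R C w)
    (h : ∀ (i j : Nat), i < R → j < C →
      pvVisGet u (i : Int) (j : Int) = pvVisGet w (i : Int) (j : Int)) :
    u = w := by
  obtain ⟨hul, hur⟩ := hu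
  obtain ⟨hwl, hwr⟩ := hw
  apply List.ext_getElem (by omega)
  intro i hi hi'
  have hui : (u[i]).length = C := hur _ (List.getElem_mem hi)
  have hwi : (w[i]).length = C := hwr _ (List.getElem_mem hi')
  apply List.ext_getElem (by omega)
  intro j hj hj'
  have := h i j (by omega) (by omega)
  rwa [pvGet_natCast u i j hi hj, pvGet_natCast w i j hi' hj'] at this

-- bundled characterization of an expansion state relative to a base matrix v:
-- (1) which cells are reached, (2) the emitted cells are the newly reached ones,
-- (3) every newly reached cell is emitted
def pvReach (rows cols : Int) (g : List (List Int)) (v : List (List Bool))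
    (res : List (List Bool) × List (Int × Int)) (Q : Int → Int → Prop) : Prop :=
  (∀ r' c', pvInB rows cols r' c' →
    (pvVisGet res.1 r' c' = true ↔
      pvVisGet v r' c' = true ∨ (pvGrid g r' c' ≠ 0 ∧ Q r' c')))
  ∧ (∀ x ∈ res.2, pvInB rows cols x.1 x.2 ∧ pvVisGet v x.1 x.2 = false ∧
      pvVisGet res.1 x.1 x.2 = true)
  ∧ (∀ r' c', pvInB rows cols r' c' → pvVisGet res.1 r' c' = true →
      pvVisGet v r' c' = false → (r', c') ∈ res.2)

theorem pvReach_base {rows cols : Int} (g : List (List Int)) (v : List (List Bool)) :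
    pvReach rows cols g v (v, []) (fun _ _ => False) := by
  refine ⟨?_, ?_, ?_⟩
  · intro r' c' _; simp
  · intro x hx; simp at hx
  · intro r' c' _ hT hF; rw [hT] at hF; exact absurd hF (by simp)

theorem pvReach_try {rows cols : Int} {g : List (List Int)} {v : List (List Bool)}
    {res : List (List Bool) × List (Int × Int)} {Q : Int → Int → Prop} (nr nc : Int)
    (hres : pvShape rows.toNat cols.toNat res.1)
    (h : pvReach rows cols g v res Q) :
    pvReach rows cols g v (pvTryB g rows cols res nr nc)
      (fun r' c' => Q r' c' ∨ (r' = nr ∧ c' = nc)) := by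
  obtain ⟨v1, a1⟩ := res
  obtain ⟨h1, h2, h3⟩ := h
  dsimp only at h1 h2 h3 hres ⊢
  rw [pvTryB_da]
  unfold pvVA pvDel
  split_ifs with hg
  · obtain ⟨g0, g1, g2, g3, gf, gn⟩ := hg
    have hnin : pvInB rows cols nr nc := ⟨g0, g1, g2, g3⟩
    refine ⟨?_, ?_, ?_⟩
    · intro r' c' h'
      dsimp only
      rw [pvVisGet_visSet hres hnin h']
      by_cases he : r' = nr ∧ c' = nc
      · rw [if_pos he]
        constructor
        · intro _
          right
          exact ⟨by rw [he.1, he.2]; exact gn, Or.inr he⟩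
        · intro _; rfl
      · rw [if_neg he]
        rw [h1 r' c' h']
        tauto
    · intro x hx
      dsimp only at hx
      rcases List.mem_append.mp hx with hxa | hxn
      · obtain ⟨hin, hbase, hget⟩ := h2 x hxa
        refine ⟨hin, hbase, ?_⟩
        dsimp only
        rw [pvVisGet_visSet hres hnin hin]
        by_cases he : x.1 = nr ∧ x.2 = nc
        · rw [if_pos he]
        · rw [if_neg he]; exact hget
      · have hxe : x = (nr, nc) := by simpa using hxn
        subst hxe
        have hbase : pvVisGet v nr nc = false := by
          by_contra hb
          have hbt : pvVisGet v nr nc = true := by simpa using hb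
          have := (h1 nr nc hnin).mpr (Or.inl hbt)
          rw [this] at gf
          exact absurd gf (by simp)
        refine ⟨hnin, hbase, ?_⟩
        dsimp only
        rw [pvVisGet_visSet hres hnin hnin, if_pos ⟨rfl, rfl⟩]
    · intro r' c' h' hT hF
      dsimp only at hT
      rw [pvVisGet_visSet hres hnin h'] at hT
      by_cases he : r' = nr ∧ c' = nc
      · exact List.mem_append.mpr (Or.inr (by simp [he.1, he.2]))
      · rw [if_neg he] at hT
        exact List.mem_append.mpr (Or.inl (h3 r' c' h' hT hF))
  · simp only [List.append_nil]
    refine ⟨?_, h2, h3⟩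
    intro r' c' h'
    rw [h1 r' c' h']
    constructor
    · rintro (hv0 | ⟨ho, hq⟩)
      · exact Or.inl hv0
      · exact Or.inr ⟨ho, Or.inl hq⟩
    · rintro (hv0 | ⟨ho, hq | he⟩)
      · exact Or.inl hv0
      · exact Or.inr ⟨ho, hq⟩
      · obtain ⟨e1, e2⟩ := he
        subst e1; subst e2
        by_cases hv1 : pvVisGet v1 r' c' = true
        · exact (h1 r' c' h').mp hv1
        · exact absurd ⟨h'.1, h'.2.1, h'.2.2.1, h'.2.2.2, by simpa using hv1, ho⟩ hg

theorem pvExpand_char {rows cols : Int} (g : List (List Int)) {v : List (List Bool)}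
    (p : Int × Int) (hv : pvShape rows.toNat cols.toNat v) :
    pvReach rows cols g v (pvExpandB g rows cols (v, []) p) (pvAdj p) := by
  have h0 := pvReach_base (rows := rows) (cols := cols) g v
  have s0 : pvShape rows.toNat cols.toNat ((v, []) :
      List (List Bool) × List (Int × Int)).1 := hv
  have h1 := pvReach_try (p.1 - 1) p.2 s0 h0
  have s1 := pvTryB_shape g rows cols (v, []) (p.1 - 1) p.2 s0
  have h2 := pvReach_try (p.1 + 1) p.2 s1 h1
  have s2 := pvTryB_shape g rows cols _ (p.1 + 1) p.2 s1
  have h3 := pvReach_try p.1 (p.2 - 1) s2 h2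
  have s3 := pvTryB_shape g rows cols _ p.1 (p.2 - 1) s2
  have h4 := pvReach_try p.1 (p.2 + 1) s3 h3
  obtain ⟨h4a, h4b, h4c⟩ := h4
  unfold pvExpandB
  refine ⟨?_, h4b, h4c⟩
  intro r' c' h'
  rw [h4a r' c' h']
  unfold pvAdj
  tauto

theorem pvFold_char {rows cols : Int} (g : List (List Int)) :
    ∀ (F : List (Int × Int)) (v : List (List Bool)),
      pvShape rows.toNat cols.toNat v →
      pvReach rows cols g v (F.foldl (pvExpandB g rows cols) (v, []))
        (fun r' c' => ∃ p ∈ F, pvAdj p r' c') := by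
  intro F
  induction F with
  | nil =>
    intro v hv
    simp only [List.foldl_nil]
    refine ⟨?_, ?_, ?_⟩
    · intro r' c' _; simp
    · intro x hx; simp at hx
    · intro r' c' _ hT hF; rw [hT] at hF; exact absurd hF (by simp)
  | cons p F ih =>
    intro v hv
    simp only [List.foldl_cons]
    have hE := pvExpand_char g p hv
    have sE := pvExpandB_shape g rows cols (v, []) p hv
    have hI := ih (pvExpandB g rows cols (v, []) p).1 sE
    rw [pvFoldB_split g rows cols F (pvExpandB g rows cols (v, []) p)]
    obtain ⟨e1, e2, e3⟩ := hE
    obtain ⟨i1, i2, i3⟩ := hI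
    refine ⟨?_, ?_, ?_⟩
    · intro r' c' h'
      dsimp only
      rw [i1 r' c' h', e1 r' c' h']
      simp only [List.mem_cons]
      constructor
      · rintro ((hv0 | ⟨ho, hq⟩) | ⟨ho, q, hqF, hadj⟩)
        · exact Or.inl hv0
        · exact Or.inr ⟨ho, p, Or.inl rfl, hq⟩
        · exact Or.inr ⟨ho, q, Or.inr hqF, hadj⟩
      · rintro (hv0 | ⟨ho, q, (rfl | hqF), hadj⟩)
        · exact Or.inl (Or.inl hv0)
        · exact Or.inl (Or.inr ⟨ho, hadj⟩)
        · exact Or.inr ⟨ho, q, hqF, hadj⟩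
    · intro x hx
      dsimp only at hx ⊢
      rcases List.mem_append.mp hx with hxa | hxb
      · obtain ⟨hin, hb, hg⟩ := e2 x hxa
        exact ⟨hin, hb, (i1 x.1 x.2 hin).mpr (Or.inl hg)⟩
      · obtain ⟨hin, hb1, hg⟩ := i2 x hxb
        refine ⟨hin, ?_, hg⟩
        by_contra hb
        have hbt : pvVisGet v x.1 x.2 = true := by simpa using hb
        have := (e1 x.1 x.2 hin).mpr (Or.inl hbt)
        rw [this] at hb1
        exact absurd hb1 (by simp)
    · intro r' c' h' hT hF
      dsimp only at hT ⊢
      by_cases hm : pvVisGet (pvExpandB g rows cols (v, []) p).1 r' c' = true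
      · exact List.mem_append.mpr (Or.inl (e3 r' c' h' hm hF))
      · have hmf : pvVisGet (pvExpandB g rows cols (v, []) p).1 r' c' = false := by
          simpa using hm
        exact List.mem_append.mpr (Or.inr (i3 r' c' h' hT hmf))

-- one relaxation round, pointwise
theorem pvClosureStep_shape (g : List (List Int)) (rows cols : Int) (v : List (List Bool)) :
    pvShape rows.toNat cols.toNat (pvClosureStep g rows cols v) := by
  constructor
  · simp [pvClosureStep, PySem.List.length_pyRange_one]
  · intro row hrow
    simp only [pvClosureStep, List.mem_map] at hrow
    obtain ⟨_, _, rfl⟩ := hrow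
    simp [PySem.List.length_pyRange_one]

theorem pvClosureStep_get (g : List (List Int)) (rows cols : Int) (v : List (List Bool))
    {r c : Int} (h : pvInB rows cols r c) :
    pvVisGet (pvClosureStep g rows cols v) r c
      = (pvVisGet v r c ||
          (decide (pvGrid g r c ≠ 0) &&
            ((decide (0 < r) && pvVisGet v (r - 1) c) ||
             (decide (r + 1 < rows) && pvVisGet v (r + 1) c) ||
             (decide (0 < c) && pvVisGet v r (c - 1)) ||
             (decide (c + 1 < cols) && pvVisGet v r (c + 1))))) := by
  obtain ⟨h0, h1, h2, h3⟩ := h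
  show PySem.List.pyGetD (PySem.List.pyGetD (pvClosureStep g rows cols v) r []) c false = _
  unfold pvClosureStep
  rw [PySem.List.pyGetD_map_pyRange_of_nonneg _ rows r [] h0 h1]
  rw [PySem.List.pyGetD_map_pyRange_of_nonneg _ cols c false h2 h3]

-- the visited set is closed under expansion away from the frontier F
def pvClosed (g : List (List Int)) (rows cols : Int) (v : List (List Bool))
    (F : List (Int × Int)) : Prop :=
  ∀ r c, pvInB rows cols r c → pvGrid g r c ≠ 0 →
    (∃ d : Int × Int, pvInB rows cols d.1 d.2 ∧ pvAdj d r c ∧ pvVisGet v d.1 d.2 = true) →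
    pvVisGet v r c = true ∨ ∃ p ∈ F, pvAdj p r c

-- under the invariant, one relaxation round IS one whole-frontier expansion
theorem pvStep_eq_fold (g : List (List Int)) (rows cols : Int) (v : List (List Bool))
    (F : List (Int × Int)) (hv : pvShape rows.toNat cols.toNat v)
    (hF : ∀ p ∈ F, pvInB rows cols p.1 p.2 ∧ pvVisGet v p.1 p.2 = true)
    (hC : pvClosed g rows cols v F) :
    pvClosureStep g rows cols v = (F.foldl (pvExpandB g rows cols) (v, [])).1 := by
  obtain ⟨f1, _, _⟩ := pvFold_char g F v hv
  apply pvEqOfGet (pvClosureStep_shape g rows cols v) (pvFoldB_shape g rows cols F (v, []) hv)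
  intro i j hi hj
  have hin : pvInB rows cols (i : Int) (j : Int) := ⟨by omega, by omega, by omega, by omega⟩
  obtain ⟨b0, b1, b2, b3⟩ := hin
  rw [pvClosureStep_get g rows cols v ⟨b0, b1, b2, b3⟩, Bool.eq_iff_iff, f1 _ _ ⟨b0, b1, b2, b3⟩]
  set r : Int := (i : Int) with hr
  set c : Int := (j : Int) with hc
  simp only [Bool.or_eq_true, Bool.and_eq_true, decide_eq_true_eq]
  constructor
  · rintro (hv0 | ⟨ho, hnb⟩)
    · exact Or.inl hv0
    · have hd : ∃ d : Int × Int, pvInB rows cols d.1 d.2 ∧ pvAdj d r c ∧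
          pvVisGet v d.1 d.2 = true := by
        rcases hnb with ((⟨hg', hget⟩ | ⟨hg', hget⟩) | ⟨hg', hget⟩) | ⟨hg', hget⟩
        · exact ⟨(r - 1, c), ⟨by omega, by omega, by omega, by omega⟩,
            Or.inr (Or.inl ⟨by omega, rfl⟩), hget⟩
        · exact ⟨(r + 1, c), ⟨by omega, by omega, by omega, by omega⟩,
            Or.inl ⟨by omega, rfl⟩, hget⟩
        · exact ⟨(r, c - 1), ⟨by omega, by omega, by omega, by omega⟩,
            Or.inr (Or.inr (Or.inr ⟨rfl, by omega⟩)), hget⟩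
        · exact ⟨(r, c + 1), ⟨by omega, by omega, by omega, by omega⟩,
            Or.inr (Or.inr (Or.inl ⟨rfl, by omega⟩)), hget⟩
      rcases hC r c ⟨b0, b1, b2, b3⟩ ho hd with hv0 | hex
      · exact Or.inl hv0
      · exact Or.inr ⟨ho, hex⟩
  · rintro (hv0 | ⟨ho, q, hqF, hadj⟩)
    · exact Or.inl hv0
    · right
      refine ⟨ho, ?_⟩
      obtain ⟨⟨q0, q1, q2, q3⟩, hqGet⟩ := hF q hqF
      rcases hadj with ⟨e1, e2⟩ | ⟨e1, e2⟩ | ⟨e1, e2⟩ | ⟨e1, e2⟩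
      · refine Or.inl (Or.inl (Or.inr ⟨by omega, ?_⟩))
        have hq1 : r + 1 = q.1 := by omega
        rw [hq1, e2]; exact hqGet
      · refine Or.inl (Or.inl (Or.inl ⟨by omega, ?_⟩))
        have hq1 : r - 1 = q.1 := by omega
        rw [hq1, e2]; exact hqGet
      · refine Or.inr ⟨by omega, ?_⟩
        have hq2 : c + 1 = q.2 := by omega
        rw [hq2, e1]; exact hqGet
      · refine Or.inl (Or.inr ⟨by omega, ?_⟩)
        have hq2 : c - 1 = q.2 := by omega
        rw [hq2, e1]; exact hqGet

theorem pvLevelB_nil (g : List (List Int)) (rows cols tr tc : Int) (fuel : Nat)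
    (v : List (List Bool)) (k : Int) : pvLevelB g rows cols tr tc fuel v [] k = -1 := by
  cases fuel <;> rfl

-- empty frontier: both sides report unreachable
theorem pvCloseNil (g : List (List Int)) (rows cols tr tc : Int)
    (v : List (List Bool)) (k : Int) (fa fb : Nat)
    (hv : pvShape rows.toNat cols.toNat v)
    (hC : pvClosed g rows cols v [])
    (hTi : pvVisGet v tr tc = true → (tr, tc) ∈ ([] : List (Int × Int)))
    (hb : 1 ≤ fb) :
    pvLevelB g rows cols tr tc fa v [] k = pvClosureLoop g rows cols tr tc fb v k := by
  rw [pvLevelB_nil]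
  obtain ⟨fb, rfl⟩ : ∃ f, fb = f + 1 := ⟨fb - 1, by omega⟩
  rw [pvClosureLoop_succ]
  have ht : ¬ pvVisGet v tr tc = true := fun h => by simpa using hTi h
  rw [if_neg ht]
  have hst : pvClosureStep g rows cols v = v := by
    rw [pvStep_eq_fold g rows cols v [] hv (by intro p hp; simp at hp) hC]
    rfl
  rw [if_pos hst]

-- main simulation: level BFS = fixed-point relaxation
theorem pvCloseSim (g : List (List Int)) (rows cols tr tc : Int)
    (hT : pvInB rows cols tr tc) :
    ∀ (n : Nat) (v : List (List Bool)) (F : List (Int × Int)) (k : Int) (fa fb : Nat),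
      pvShape rows.toNat cols.toNat v →
      (∀ p ∈ F, pvInB rows cols p.1 p.2 ∧ pvVisGet v p.1 p.2 = true) →
      pvClosed g rows cols v F →
      (pvVisGet v tr tc = true → (tr, tc) ∈ F) →
      pvCountFalse v + F.length ≤ n →
      pvCountFalse v + F.length ≤ fa →
      pvCountFalse v + 1 ≤ fb →
      pvLevelB g rows cols tr tc fa v F k = pvClosureLoop g rows cols tr tc fb v k := by
  intro n
  induction n with
  | zero =>
    intro v F k fa fb hv hF hC hTi hn ha hb
    have hF0 : F = [] := by
      cases F with
      | nil => rfl
      | cons p F => simp at hn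
    subst hF0
    exact pvCloseNil g rows cols tr tc v k fa fb hv hC hTi (by omega)
  | succ n ih =>
    intro v F k fa fb hv hF hC hTi hn ha hb
    cases F with
    | nil => exact pvCloseNil g rows cols tr tc v k fa fb hv hC hTi (by omega)
    | cons p F' =>
      obtain ⟨fa', rfl⟩ : ∃ f, fa = f + 1 := ⟨fa - 1, by simp at ha; omega⟩
      obtain ⟨fb', rfl⟩ : ∃ f, fb = f + 1 := ⟨fb - 1, by omega⟩
      rw [pvLevelB_cons, pvClosureLoop_succ]
      by_cases hc : (p :: F').contains (tr, tc)
      · have hmem : (tr, tc) ∈ p :: F' := List.contains_iff_mem.mp hc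
        have hvt := (hF _ hmem).2
        rw [if_pos hc, if_pos hvt]
      · rw [if_neg hc]
        have htv : ¬ pvVisGet v tr tc = true :=
          fun h => hc (List.contains_iff_mem.mpr (hTi h))
        rw [if_neg htv]
        have hstep := pvStep_eq_fold g rows cols v (p :: F') hv hF hC
        obtain ⟨c1, c2, c3⟩ := pvFold_char g (p :: F') v hv
        have hv1 : pvShape rows.toNat cols.toNat
            ((p :: F').foldl (pvExpandB g rows cols) (v, [])).1 :=
          pvFoldB_shape g rows cols _ _ hv
        have hmes : pvCountFalse ((p :: F').foldl (pvExpandB g rows cols) (v, [])).1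
            + ((p :: F').foldl (pvExpandB g rows cols) (v, [])).2.length
            = pvCountFalse v := by
          have := pvFoldB_measure g rows cols (p :: F') (v, []) hv
          simpa using this
        by_cases hFD : ((p :: F').foldl (pvExpandB g rows cols) (v, [])).2 = []
        · have hveq : ((p :: F').foldl (pvExpandB g rows cols) (v, [])).1 = v := by
            apply pvEqOfGet hv1 hv
            intro i j hi hj
            have hin : pvInB rows cols (i : Int) (j : Int) :=
              ⟨by omega, by omega, by omega, by omega⟩
            rw [Bool.eq_iff_iff]
            constructor
            · intro hT1
              by_cases hb0 : pvVisGet v (i : Int) (j : Int) = true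
              · exact hb0
              · have := c3 _ _ hin hT1 (by simpa using hb0)
                rw [hFD] at this
                simp at this
            · intro hb0
              exact (c1 _ _ hin).mpr (Or.inl hb0)
          rw [if_pos (hstep.trans hveq), hFD, pvLevelB_nil]
        · have hne : ¬ pvClosureStep g rows cols v = v := by
            rw [hstep]
            intro he
            obtain ⟨x, hx⟩ := List.exists_mem_of_ne_nil _ hFD
            obtain ⟨hxin, hxf, hxt⟩ := c2 x hx
            rw [he] at hxt
            rw [hxt] at hxf
            exact absurd hxf (by simp)
          rw [if_neg hne, hstep]
          have hlFD : ((p :: F').foldl (pvExpandB g rows cols) (v, [])).2.length ≠ 0 := by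
            intro h0
            exact hFD (List.eq_nil_of_length_eq_zero h0)
          apply ih _ _ (k + 1) fa' fb' hv1
          · intro q hq
            exact ⟨(c2 q hq).1, (c2 q hq).2.2⟩
          · rintro r c hin ho ⟨d, hdin, hdadj, hdget⟩
            by_cases hdv : pvVisGet v d.1 d.2 = true
            · rcases hC r c hin ho ⟨d, hdin, hdadj, hdv⟩ with hvr | ⟨q, hqF, hqadj⟩
              · exact Or.inl ((c1 r c hin).mpr (Or.inl hvr))
              · exact Or.inl ((c1 r c hin).mpr (Or.inr ⟨ho, q, hqF, hqadj⟩))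
            · have hdf : pvVisGet v d.1 d.2 = false := by simpa using hdv
              right
              exact ⟨(d.1, d.2), c3 d.1 d.2 hdin hdget hdf, hdadj⟩
          · intro hT1
            exact c3 tr tc hT hT1 (by simpa using htv)
          · simp only [List.length_cons] at hn
            omega
          · simp only [List.length_cons] at ha
            omega
          · omega

-- the level BFS and B's fixed-point relaxation coincide on in-bounds endpoints
theorem pvLegBC (g : List (List Int)) (rows cols sr sc tr tc : Int)
    (hs : pvInB rows cols sr sc) (ht : pvInB rows cols tr tc) :
    pvLegB g rows cols sr sc tr tc = pvLegC g rows cols sr sc tr tc := by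
  unfold pvLegB pvLegC
  have hsh : pvShape rows.toNat cols.toNat (pvVisSet (pvVisInit rows cols) sr sc) :=
    pvShape_visSet (pvShape_visInit rows cols) sr sc
  have hget : ∀ r c, pvInB rows cols r c →
      pvVisGet (pvVisSet (pvVisInit rows cols) sr sc) r c = decide (r = sr ∧ c = sc) :=
    fun r c h => pvVisGet_start hs h
  apply pvCloseSim g rows cols tr tc ht
    (pvCountFalse (pvVisSet (pvVisInit rows cols) sr sc) + 1) _ _ 0 _ _ hsh
  · intro p hp
    have hpe : p = (sr, sc) := by simpa using hp
    subst hpe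
    exact ⟨hs, by rw [hget sr sc hs]; simp⟩
  · rintro r c hin ho ⟨d, hdin, hdadj, hdget⟩
    rw [hget d.1 d.2 hdin] at hdget
    have hde : d.1 = sr ∧ d.2 = sc := by simpa using hdget
    right
    refine ⟨(sr, sc), by simp, ?_⟩
    have hd : d = (sr, sc) := Prod.ext hde.1 hde.2
    rw [← hd]
    exact hdadj
  · intro hT
    rw [hget tr tc ht] at hT
    have he : tr = sr ∧ tc = sc := by simpa using hT
    simp [he.1, he.2]
  · simp
  · simp
  · omega

-- the two outer loops coincide (every listed cell and the threaded position are in bounds)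
theorem pvOuterBC (g : List (List Int)) (rows cols : Int) :
    ∀ (L : List (Int × Int × Int)) (pr pc total : Int),
      (∀ x ∈ L, pvInB rows cols x.2.1 x.2.2) →
      (L ≠ [] → pvInB rows cols pr pc) →
      pvOuterB g rows cols L pr pc total = pvOuterC g rows cols L pr pc total := by
  intro L
  induction L with
  | nil => intro pr pc total _ _; rfl
  | cons x rest ih =>
    intro pr pc total hmem hprev
    obtain ⟨xv, xr, xc⟩ := x
    have hx : pvInB rows cols xr xc := by
      have := hmem _ (List.mem_cons_self)
      simpa using this
    have hp : pvInB rows cols pr pc := hprev (by simp)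
    simp only [pvOuterB, pvOuterC]
    rw [pvLegBC g rows cols pr pc xr xc hp hx]
    by_cases hd : pvLegC g rows cols pr pc xr xc = -1
    · rw [if_pos hd, if_pos hd]
    · rw [if_neg hd, if_neg hd]
      exact ih xr xc _ (fun y hy => hmem y (List.mem_cons_of_mem _ hy)) (fun _ => hx)

-- every collected item lies inside the grid
theorem pvItems_mem (g : List (List Int)) (rows cols : Int) :
    ∀ x ∈ pvItems g rows cols, pvInB rows cols x.2.1 x.2.2 := by
  intro x hx
  unfold pvItems at hx
  have hx' := (PySem.List.sorted2_perm _ _ _ _).mem_iff.mp hx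
  simp only [List.mem_flatMap, List.mem_map, List.mem_filter,
    PySem.List.mem_pyRange_one] at hx'
  obtain ⟨r, ⟨hr0, hr1⟩, c, ⟨⟨hc0, hc1⟩, -⟩, rfl⟩ := hx'
  exact ⟨hr0, hr1, hc0, hc1⟩

-- ===== VERDICT (by name: the statement is the Claim_ definition above) =====
theorem collect_items_spec : Claim_equal_collect_items := by
  intro g _ _
  unfold Spec_collect_items collect_items collect_items_alt
  dsimp only
  rw [PySem.List.insert_zero]
  have h := pvOuterSim g (g.length : Int) (((PySem.List.pyGetD g 0 []).length : Nat) : Int)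
    (pvItems g (g.length : Int) (((PySem.List.pyGetD g 0 []).length : Nat) : Int)) [] (1, 0, 0) 0
  dsimp only at h
  simp only [List.nil_append, List.length_nil, Nat.cast_zero, zero_add] at h
  have e : ((((1, 0, 0) :: pvItems g (g.length : Int)
      (((PySem.List.pyGetD g 0 []).length : Nat) : Int)).length : Nat) : Int)
      = 1 + (((pvItems g (g.length : Int)
        (((PySem.List.pyGetD g 0 []).length : Nat) : Int)).length : Nat) : Int) := by
    push_cast [List.length_cons]
    ring
  rw [e]
  refine h.trans ?_
  apply pvOuterBC
  · exact pvItems_mem g _ _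
  · intro hne
    obtain ⟨x, hx⟩ := List.exists_mem_of_ne_nil _ hne
    have := pvItems_mem g _ _ x hx
    exact ⟨by omega, by omega, by omega, by omega⟩
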